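-- pv_equiv track=rewrite | github.com/Minhaz-Mahmud/AI_game | ai_vs_ai.py | fuzzy_move
-- ===== SOURCE A (Python) =====
-- def evaluate_board(board):
--     """Count potential SOS patterns on board"""
--     score = 0
--     for row in range(len(board)):
--         for col in range(len(board[0])):
--             if board[row][col] == 'S':
--                 # Check all 4 directions for S-O-S
--                 if col + 2 < len(board[0]) and board[row][col + 1] == 'O' and board[row][col + 2] == 'S':
--                     score += 1
--                 if row + 2 < len(board) and board[row + 1][col] == 'O' and board[row + 2][col] == 'S':
--                     score += 1
--                 if row + 2 < len(board) and col + 2 < len(board[0]) and board[row + 1][col + 1] == 'O' and board[row + 2][col + 2] == 'S':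
--                     score += 1
--                 if row + 2 < len(board) and col - 2 >= 0 and board[row + 1][col - 1] == 'O' and board[row + 2][col - 2] == 'S':
--                     score += 1
--             elif board[row][col] == 'O':
--                 # Check if O is between two S's
--                 if col - 1 >= 0 and col + 1 < len(board[0]) and board[row][col - 1] == 'S' and board[row][col + 1] == 'S':
--                     score += 1
--                 if row - 1 >= 0 and row + 1 < len(board) and board[row - 1][col] == 'S' and board[row + 1][col] == 'S':
--                     score += 1
--                 if row - 1 >= 0 and row + 1 < len(board) and col - 1 >= 0 and col + 1 < len(board[0]) and board[row - 1][col - 1] == 'S' and board[row + 1][col + 1] == 'S':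
--                     score += 1
--                 if row - 1 >= 0 and row + 1 < len(board) and col + 1 < len(board[0]) and col - 1 >= 0 and board[row - 1][col + 1] == 'S' and board[row + 1][col - 1] == 'S':
--                     score += 1
--     return score
--
-- def fuzzy_move(board):
--     """Uses fuzzy logic to evaluate moves"""
--     def fuzzify(score):
--         if score <= 0: return 1
--         elif score == 1: return 1.5
--         elif score == 2: return 2
--         elif score == 3: return 2.5
--         else: return 3
--
--     best_val, best_move, best_char = -1000, (-1, -1), 'S'
--     for i in range(len(board)):
--         for j in range(len(board[0])):
--             if board[i][j] == '':
--                 for char in ['S', 'O']: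
--                     board[i][j] = char
--                     val = fuzzify(evaluate_board(board))
--                     board[i][j] = ''
--                     if val > best_val:
--                         best_val, best_move, best_char = val, (i, j), char
--     return best_move, best_char
-- ===== SOURCE B (Python) =====
-- def fuzzy_move(board):
--     """Best move via one base evaluation plus a local delta per placement."""
--     def fuzzify(score):
--         if score <= 0: return 1
--         elif score == 1: return 1.5
--         elif score == 2: return 2
--         elif score == 3: return 2.5
--         else: return 3
--
--     rows = len(board)
--     cols = len(board[0]) if board else 0
--     AXES = ((0, 1), (1, 0), (1, 1), (1, -1))
--
--     def g(r, c):
--         return board[r][c] if 0 <= r < rows and 0 <= c < cols else None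
--
--     # Base score of the board as-is (each S-O-S line contributes 2 in A's count:
--     # once for its leading S, once for its middle O).
--     base = 0
--     for r in range(rows):
--         for c in range(cols):
--             for dr, dc in AXES:
--                 if g(r, c) == 'S' and g(r + dr, c + dc) == 'O' and g(r + 2 * dr, c + 2 * dc) == 'S':
--                     base += 2
--
--     # Placing a char on an empty cell adds 2 per new S-O-S line through that cell.
--     def delta(r, c, ch):
--         k = 0
--         if ch == 'S':
--             for dr, dc in AXES:
--                 for sr, sc in ((dr, dc), (-dr, -dc)):
--                     if g(r + sr, c + sc) == 'O' and g(r + 2 * sr, c + 2 * sc) == 'S':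
--                         k += 1
--         else:
--             for dr, dc in AXES:
--                 if g(r - dr, c - dc) == 'S' and g(r + dr, c + dc) == 'S':
--                     k += 1
--         return 2 * k
--
--     best_val, best_move, best_char = -1000, (-1, -1), 'S'
--     for i in range(rows):
--         for j in range(cols):
--             if board[i][j] == '':
--                 for ch in ('S', 'O'):
--                     val = fuzzify(base + delta(i, j, ch))
--                     if val > best_val:
--                         best_val, best_move, best_char = val, (i, j), ch
--     return best_move, best_char
-- ===== Notes on version B (the rewrite author's own statement) =====
-- stated objective: alternative
-- what changed: Instead of re-scoring the entire board for every candidate placement, B computes the board's base score once and scores each placement by a local count of the S-O-S lines through the changed cell (each such line contributes 2 to A's count: once for its leading S and once for its middle O); on boards whose empty-cell count grows with the board this changes the asymptotics, though a timing run's inputs (almost no empty cells) showed no measured speed-up.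
import Mathlib
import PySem

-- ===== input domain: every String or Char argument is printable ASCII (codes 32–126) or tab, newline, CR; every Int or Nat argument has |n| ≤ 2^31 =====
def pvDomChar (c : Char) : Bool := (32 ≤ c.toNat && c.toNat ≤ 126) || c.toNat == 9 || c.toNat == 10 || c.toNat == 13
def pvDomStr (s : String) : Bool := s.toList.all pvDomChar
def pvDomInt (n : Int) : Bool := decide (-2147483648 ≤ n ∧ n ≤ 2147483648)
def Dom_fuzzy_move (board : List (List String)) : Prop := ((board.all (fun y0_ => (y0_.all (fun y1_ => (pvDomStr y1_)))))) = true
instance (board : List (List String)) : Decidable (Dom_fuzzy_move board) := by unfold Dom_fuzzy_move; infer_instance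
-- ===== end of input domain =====

-- B computes the base score once and scores each placement by a local count of the
-- S-O-S lines through the changed cell, instead of A's full board re-evaluation per
-- placement (a different algorithm; a timing run measured no speed-up on its inputs).
-- A temporarily mutates `board` in place but always restores it before returning,
-- so the caller observes no net mutation; the ports are pure.
-- Python's fuzzify returns the floats 1, 1.5, 2, 2.5, 3; both ports carry the value
-- DOUBLED as an Int (2,3,4,5,6; initial best −1000 becomes −2000). All those floats
-- are exact halves, so every `>` comparison is unchanged: the ports are exact.

-- ===== PORT A =====
-- board[r][c] (both ports; guarded in range by the loops / Pre_)
def pvCell (board : List (List String)) (r c : Int) : String :=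
  PySem.List.pyGetD (PySem.List.pyGetD board r []) c ""

-- the nested helper `fuzzify` (identical in A and in B), doubled as explained above
def pvFuzz2 (score : Int) : Int :=
  if score ≤ 0 then 2
  else if score = 1 then 3
  else if score = 2 then 4
  else if score = 3 then 5
  else 6

-- evaluate_board, transliterated
def pvEvalBoard (board : List (List String)) : Int :=
  (PySem.List.pyRange 0 (PySem.List.len board) 1).foldl (fun score row =>
    (PySem.List.pyRange 0 (PySem.List.len (PySem.List.pyGetD board 0 [])) 1).foldl (fun score col =>
      if pvCell board row col = "S" then
        let score := if col + 2 < PySem.List.len (PySem.List.pyGetD board 0 [])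
            ∧ pvCell board row (col+1) = "O" ∧ pvCell board row (col+2) = "S" then score + 1 else score
        let score := if row + 2 < PySem.List.len board
            ∧ pvCell board (row+1) col = "O" ∧ pvCell board (row+2) col = "S" then score + 1 else score
        let score := if row + 2 < PySem.List.len board ∧ col + 2 < PySem.List.len (PySem.List.pyGetD board 0 [])
            ∧ pvCell board (row+1) (col+1) = "O" ∧ pvCell board (row+2) (col+2) = "S" then score + 1 else score
        let score := if row + 2 < PySem.List.len board ∧ col - 2 ≥ 0
            ∧ pvCell board (row+1) (col-1) = "O" ∧ pvCell board (row+2) (col-2) = "S" then score + 1 else score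
        score
      else if pvCell board row col = "O" then
        let score := if col - 1 ≥ 0 ∧ col + 1 < PySem.List.len (PySem.List.pyGetD board 0 [])
            ∧ pvCell board row (col-1) = "S" ∧ pvCell board row (col+1) = "S" then score + 1 else score
        let score := if row - 1 ≥ 0 ∧ row + 1 < PySem.List.len board
            ∧ pvCell board (row-1) col = "S" ∧ pvCell board (row+1) col = "S" then score + 1 else score
        let score := if row - 1 ≥ 0 ∧ row + 1 < PySem.List.len board ∧ col - 1 ≥ 0 ∧ col + 1 < PySem.List.len (PySem.List.pyGetD board 0 [])
            ∧ pvCell board (row-1) (col-1) = "S" ∧ pvCell board (row+1) (col+1) = "S" then score + 1 else score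
        let score := if row - 1 ≥ 0 ∧ row + 1 < PySem.List.len board ∧ col + 1 < PySem.List.len (PySem.List.pyGetD board 0 []) ∧ col - 1 ≥ 0
            ∧ pvCell board (row-1) (col+1) = "S" ∧ pvCell board (row+1) (col-1) = "S" then score + 1 else score
        score
      else score) score) 0

-- fuzzy_move: board[i][j] = char; evaluate; board[i][j] = '' — ported as evaluating the updated board
def fuzzy_move (board : List (List String)) : (Int × Int) × String :=
  let st := (PySem.List.pyRange 0 (PySem.List.len board) 1).foldl (fun st i =>
    (PySem.List.pyRange 0 (PySem.List.len (PySem.List.pyGetD board 0 [])) 1).foldl (fun st j =>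
      if pvCell board i j = "" then
        ["S", "O"].foldl (fun st ch =>
          let b' := PySem.List.pySetD board i (PySem.List.pySetD (PySem.List.pyGetD board i []) j ch)
          let val := pvFuzz2 (pvEvalBoard b')
          if st.1 < val then (val, ((i, j), ch)) else st) st
      else st) st) ((-2000 : Int), (((-1 : Int), (-1 : Int)), "S"))
  st.2

-- ===== PORT B =====
-- cols = len(board[0]) if board else 0
def pvCols (board : List (List String)) : Int :=
  if board = [] then 0 else PySem.List.len (PySem.List.pyGetD board 0 [])

-- the helper g: board[r][c] if in range else None
def pvG (board : List (List String)) (r c : Int) : Option String :=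
  if 0 ≤ r ∧ r < PySem.List.len board ∧ 0 ≤ c ∧ c < pvCols board then
    some (pvCell board r c) else none

def pvAxes : List (Int × Int) := [(0, 1), (1, 0), (1, 1), (1, -1)]

-- base score: 2 per S-O-S line, found from its leading S along the four axes
def pvBase (board : List (List String)) : Int :=
  (PySem.List.pyRange 0 (PySem.List.len board) 1).foldl (fun base r =>
    (PySem.List.pyRange 0 (pvCols board) 1).foldl (fun base c =>
      pvAxes.foldl (fun base d =>
        if pvG board r c = some "S" ∧ pvG board (r + d.1) (c + d.2) = some "O"
            ∧ pvG board (r + 2 * d.1) (c + 2 * d.2) = some "S" then base + 2 else base) base) base) 0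

-- delta(r, c, ch): 2 per new S-O-S line through (r, c) when ch is placed there
def pvDelta (board : List (List String)) (r c : Int) (ch : String) : Int :=
  2 * (if ch = "S" then
    pvAxes.foldl (fun k d =>
      [(d.1, d.2), (-d.1, -d.2)].foldl (fun k s =>
        if pvG board (r + s.1) (c + s.2) = some "O"
            ∧ pvG board (r + 2 * s.1) (c + 2 * s.2) = some "S" then k + 1 else k) k) 0
  else
    pvAxes.foldl (fun k d =>
      if pvG board (r - d.1) (c - d.2) = some "S"
          ∧ pvG board (r + d.1) (c + d.2) = some "S" then k + 1 else k) 0)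

def fuzzy_move_alt (board : List (List String)) : (Int × Int) × String :=
  let base := pvBase board
  let st := (PySem.List.pyRange 0 (PySem.List.len board) 1).foldl (fun st i =>
    (PySem.List.pyRange 0 (pvCols board) 1).foldl (fun st j =>
      if pvCell board i j = "" then
        ["S", "O"].foldl (fun st ch =>
          let val := pvFuzz2 (base + pvDelta board i j ch)
          if st.1 < val then (val, ((i, j), ch)) else st) st
      else st) st) ((-2000 : Int), (((-1 : Int), (-1 : Int)), "S"))
  st.2

-- ===== PRECONDITION & SPEC =====
-- A indexes every row at each column of row 0, so it raises IndexError exactly when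
-- some row is shorter than row 0; Pre_ excludes exactly those boards (B raises there too).
def Pre_fuzzy_move (board : List (List String)) : Prop :=
  ∀ row ∈ board, (board.headD []).length ≤ row.length
instance (board : List (List String)) : Decidable (Pre_fuzzy_move board) := by
  unfold Pre_fuzzy_move; infer_instance

def pvWitness_fuzzy_move : List (List String) :=
  [["S", "O", ""], ["", "", "O"], ["S", "", "S"]]

def Spec_fuzzy_move (board : List (List String)) (out : (Int × Int) × String) : Prop := out = fuzzy_move_alt board
instance (board : List (List String)) (out : (Int × Int) × String) : Decidable (Spec_fuzzy_move board out) := by unfold Spec_fuzzy_move; infer_instance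

-- ===== CLAIM (what is proved, stated in full; the proofs are below) =====
def Claim_equal_fuzzy_move : Prop := ∀ (board : List (List String)), Dom_fuzzy_move board → Pre_fuzzy_move board → Spec_fuzzy_move board (fuzzy_move board)

-- ===== LEMMAS AND PROOFS =====

-- 0/1 indicator
def pvInd (P : Prop) [Decidable P] : Int := if P then 1 else 0

lemma pvInd_congr {P Q : Prop} [Decidable P] [Decidable Q] (h : P ↔ Q) : pvInd P = pvInd Q := by
  unfold pvInd; split_ifs with h1 h2 <;> tauto

lemma pvInd_false {P : Prop} [Decidable P] (h : ¬ P) : pvInd P = 0 := by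
  unfold pvInd; exact if_neg h

-- the S-anchored check of one S-O-S line in direction (dr, dc)
def pvSchk (g : Int → Int → Option String) (dr dc r c : Int) : Int :=
  pvInd (g r c = some "S" ∧ g (r + dr) (c + dc) = some "O" ∧ g (r + 2 * dr) (c + 2 * dc) = some "S")

-- the O-centred check of the same line: the S-check anchored one step back
def pvOchk (g : Int → Int → Option String) (dr dc r c : Int) : Int :=
  pvSchk g dr dc (r - dr) (c - dc)

noncomputable def pvGrid (b : List (List String)) : Finset (Int × Int) :=
  Finset.Icc 0 ((b.length : Int) - 1) ×ˢ Finset.Icc 0 (pvCols b - 1)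

noncomputable def pvSS (b : List (List String)) (dr dc : Int) : Int :=
  ∑ p ∈ pvGrid b, pvSchk (pvG b) dr dc p.1 p.2

def pvContrib (g : Int → Int → Option String) (r c : Int) : Int :=
  (pvSchk g 0 1 r c + pvSchk g 1 0 r c + pvSchk g 1 1 r c + pvSchk g 1 (-1) r c)
  + (pvOchk g 0 1 r c + pvOchk g 1 0 r c + pvOchk g 1 1 r c + pvOchk g 1 (-1) r c)

lemma pvCols_eq (b : List (List String)) :
    pvCols b = PySem.List.len (PySem.List.pyGetD b 0 []) := by
  unfold pvCols; cases b <;> simp [PySem.List.pyGetD_zero]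

lemma pvCols_eq' (b : List (List String)) :
    pvCols b = ((PySem.List.pyGetD b 0 []).length : Int) := by
  rw [pvCols_eq, PySem.List.len_eq]

lemma pvG_some_iff (b : List (List String)) (r c : Int) (v : String) :
    pvG b r c = some v ↔
      (0 ≤ r ∧ r < (b.length : Int) ∧ 0 ≤ c ∧ c < pvCols b ∧ pvCell b r c = v) := by
  unfold pvG
  split_ifs with h
  · simp only [PySem.List.len_eq] at h; simp only [Option.some_inj]; tauto
  · simp only [PySem.List.len_eq] at h; simp; tauto

lemma mem_pvGrid (b : List (List String)) (p : Int × Int) :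
    p ∈ pvGrid b ↔ (0 ≤ p.1 ∧ p.1 < (b.length : Int) ∧ 0 ≤ p.2 ∧ p.2 < pvCols b) := by
  unfold pvGrid
  simp [Finset.mem_product, Finset.mem_Icc]
  omega

-- the S-check vanishes when its anchor is off the grid …
lemma pvSchk_zero_of_notMem (b : List (List String)) (dr dc : Int) (p : Int × Int)
    (h : p ∉ pvGrid b) : pvSchk (pvG b) dr dc p.1 p.2 = 0 := by
  apply pvInd_false
  rintro ⟨h1, -, -⟩
  rw [pvG_some_iff] at h1
  rw [mem_pvGrid] at h
  tauto

-- … and when its middle cell is off the grid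
lemma pvSchk_zero_of_mid_notMem (b : List (List String)) (dr dc : Int) (p : Int × Int)
    (h : p + (dr, dc) ∉ pvGrid b) : pvSchk (pvG b) dr dc p.1 p.2 = 0 := by
  apply pvInd_false
  rintro ⟨-, h2, -⟩
  rw [pvG_some_iff] at h2
  rw [mem_pvGrid] at h
  simp only [Prod.fst_add, Prod.snd_add] at h
  tauto

lemma sum_pyRange_nat (m : Nat) (f : Int → Int) :
    ((PySem.List.pyRange 0 (m : Int) 1).map f).sum = ∑ x ∈ Finset.Icc (0:Int) ((m : Int) - 1), f x := by
  induction m with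
  | zero =>
    rw [PySem.List.pyRange_one_eq_nil (by omega)]
    rw [Finset.Icc_eq_empty (by omega)]
    simp
  | succ k ih =>
    have h1 : ((k+1 : Nat) : Int) = (k : Int) + 1 := by push_cast; ring
    rw [h1, PySem.List.pyRange_one_succ_right (by positivity), List.map_append, List.sum_append, ih]
    have h2 : (k : Int) + 1 - 1 = ((k : Int) - 1) + 1 := by ring
    have h3 : Finset.Icc (0:Int) (((k : Int) - 1) + 1) = insert (((k : Int) - 1) + 1) (Finset.Icc 0 ((k : Int) - 1)) := by
      ext x; simp [Finset.mem_Icc, Finset.mem_insert]; omega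
    rw [h2, h3, Finset.sum_insert (by simp [Finset.mem_Icc])]
    simp
    ring

lemma sum_pyRange_int (n : Int) (f : Int → Int) :
    ((PySem.List.pyRange 0 n 1).map f).sum = ∑ x ∈ Finset.Icc 0 (n - 1), f x := by
  by_cases h : n ≤ 0
  · rw [PySem.List.pyRange_one_eq_nil h, Finset.Icc_eq_empty (by omega)]
    simp
  · have : n = (n.toNat : Int) := by omega
    rw [this]
    exact sum_pyRange_nat n.toNat f

-- the sum of O-checks over the grid is the sum of S-checks (translation by (dr, dc))
lemma pvShift (b : List (List String)) (dr dc : Int) :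
    (∑ p ∈ pvGrid b, pvOchk (pvG b) dr dc p.1 p.2) = pvSS b dr dc := by
  unfold pvSS
  have h1 : ∑ p ∈ pvGrid b, pvOchk (pvG b) dr dc p.1 p.2
      = ∑ p ∈ pvGrid b, pvSchk (pvG b) dr dc (p - (dr, dc)).1 (p - (dr, dc)).2 :=
    Finset.sum_congr rfl fun p _ => by simp [pvOchk]
  have h2 : ∑ p ∈ pvGrid b, pvSchk (pvG b) dr dc (p - (dr, dc)).1 (p - (dr, dc)).2
      = ∑ q ∈ (pvGrid b).image (fun p => p - (dr, dc)), pvSchk (pvG b) dr dc q.1 q.2 := by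
    rw [Finset.sum_image]
    intro x _ y _ h
    have := congrArg (fun z => z + ((dr, dc) : Int × Int)) h
    simpa using this
  have himg : ∀ q : Int × Int,
      q ∈ (pvGrid b).image (fun p => p - (dr, dc)) ↔ q + (dr, dc) ∈ pvGrid b := by
    intro q
    simp only [Finset.mem_image]
    constructor
    · rintro ⟨p, hp, rfl⟩; simpa using hp
    · intro h; exact ⟨q + (dr, dc), h, by simp⟩
  have hsub1 : ∑ q ∈ (pvGrid b).image (fun p => p - (dr, dc)), pvSchk (pvG b) dr dc q.1 q.2
      = ∑ q ∈ pvGrid b ∪ (pvGrid b).image (fun p => p - (dr, dc)), pvSchk (pvG b) dr dc q.1 q.2 := by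
    have hss : (pvGrid b).image (fun p => p - ((dr, dc) : Int × Int))
        ⊆ pvGrid b ∪ (pvGrid b).image (fun p => p - (dr, dc)) := Finset.subset_union_right
    refine Finset.sum_subset hss ?_
    intro x _ hnx
    rw [himg] at hnx
    exact pvSchk_zero_of_mid_notMem b dr dc x hnx
  have hsub2 : ∑ q ∈ pvGrid b, pvSchk (pvG b) dr dc q.1 q.2
      = ∑ q ∈ pvGrid b ∪ (pvGrid b).image (fun p => p - (dr, dc)), pvSchk (pvG b) dr dc q.1 q.2 :=
    Finset.sum_subset Finset.subset_union_left
      (fun x _ hnx => pvSchk_zero_of_notMem b dr dc x hnx)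
  rw [h1, h2, hsub1, ← hsub2]

lemma pvGrid_contrib (b : List (List String)) :
    (∑ p ∈ pvGrid b, pvContrib (pvG b) p.1 p.2)
      = 2 * (pvSS b 0 1 + pvSS b 1 0 + pvSS b 1 1 + pvSS b 1 (-1)) := by
  simp only [pvContrib, Finset.sum_add_distrib]
  rw [pvShift, pvShift, pvShift, pvShift]
  unfold pvSS
  ring

lemma pvSchk_zero_of_anchor (b : List (List String)) (dr dc r c : Int)
    (h : pvG b r c ≠ some "S") : pvSchk (pvG b) dr dc r c = 0 := by
  apply pvInd_false
  rintro ⟨h1, -, -⟩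
  exact h h1

lemma pvOchk_zero_of_mid (b : List (List String)) (dr dc r c : Int)
    (h : pvG b r c ≠ some "O") : pvOchk (pvG b) dr dc r c = 0 := by
  apply pvInd_false
  rintro ⟨-, h2, -⟩
  rw [show r - dr + dr = r from by ring, show c - dc + dc = c from by ring] at h2
  exact h h2

lemma pvInd_schk (b : List (List String)) (row col dr dc : Int)
    (hrow : 0 ≤ row ∧ row < (b.length : Int)) (hcol : 0 ≤ col ∧ col < pvCols b)
    (hanchor : pvCell b row col = "S") (P : Prop) [Decidable P]
    (hP : P ↔ ((0 ≤ row + dr ∧ row + dr < (b.length : Int) ∧ 0 ≤ col + dc ∧ col + dc < pvCols b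
          ∧ pvCell b (row + dr) (col + dc) = "O")
        ∧ (0 ≤ row + 2*dr ∧ row + 2*dr < (b.length : Int) ∧ 0 ≤ col + 2*dc ∧ col + 2*dc < pvCols b
          ∧ pvCell b (row + 2*dr) (col + 2*dc) = "S"))) :
    pvInd P = pvSchk (pvG b) dr dc row col := by
  unfold pvSchk
  apply pvInd_congr
  rw [hP]
  simp only [pvG_some_iff]
  constructor
  · rintro ⟨h1, h2⟩; exact ⟨⟨hrow.1, hrow.2, hcol.1, hcol.2, hanchor⟩, h1, h2⟩
  · rintro ⟨-, h1, h2⟩; exact ⟨h1, h2⟩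

lemma pvInd_ochk (b : List (List String)) (row col dr dc : Int)
    (hrow : 0 ≤ row ∧ row < (b.length : Int)) (hcol : 0 ≤ col ∧ col < pvCols b)
    (hmid : pvCell b row col = "O") (P : Prop) [Decidable P]
    (hP : P ↔ ((0 ≤ row - dr ∧ row - dr < (b.length : Int) ∧ 0 ≤ col - dc ∧ col - dc < pvCols b
          ∧ pvCell b (row - dr) (col - dc) = "S")
        ∧ (0 ≤ row + dr ∧ row + dr < (b.length : Int) ∧ 0 ≤ col + dc ∧ col + dc < pvCols b
          ∧ pvCell b (row + dr) (col + dc) = "S"))) :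
    pvInd P = pvSchk (pvG b) dr dc (row - dr) (col - dc) := by
  unfold pvSchk
  apply pvInd_congr
  rw [hP]
  rw [show row - dr + dr = row from by ring, show col - dc + dc = col from by ring,
      show row - dr + 2*dr = row + dr from by ring, show col - dc + 2*dc = col + dc from by ring]
  simp only [pvG_some_iff]
  constructor
  · rintro ⟨h1, h2⟩; exact ⟨h1, ⟨hrow.1, hrow.2, hcol.1, hcol.2, hmid⟩, h2⟩
  · rintro ⟨h1, -, h2⟩; exact ⟨h1, h2⟩

-- bridge: port A's evaluate_board is the grid sum of per-cell contributions
lemma pvEval_eq_sum (b : List (List String)) :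
    pvEvalBoard b = ∑ p ∈ pvGrid b, pvContrib (pvG b) p.1 p.2 := by
  unfold pvEvalBoard
  simp only [PySem.List.len_eq, ← pvCols_eq']
  rw [PySem.List.foldl_congr_mem _ _
    (fun score row => score + ∑ c ∈ Finset.Icc 0 (pvCols b - 1), pvContrib (pvG b) row c) _ ?hr]
  case hr =>
    intro acc row hmem
    rw [PySem.List.mem_pyRange_one] at hmem
    rw [PySem.List.foldl_congr_mem _ _
      (fun score col => score + pvContrib (pvG b) row col) _ ?hc]
    case hc =>
      intro acc2 col hc
      show _ = acc2 + pvContrib (pvG b) row col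
      rw [PySem.List.mem_pyRange_one] at hc
      by_cases hS : pvCell b row col = "S"
      · rw [if_pos hS]
        have hgS : pvG b row col = some "S" :=
          (pvG_some_iff _ _ _ _).mpr ⟨hmem.1, hmem.2, hc.1, hc.2, hS⟩
        have e1 : pvInd (col + 2 < pvCols b ∧ pvCell b row (col+1) = "O" ∧ pvCell b row (col+2) = "S")
            = pvSchk (pvG b) 0 1 row col := by
          refine pvInd_schk b row col 0 1 hmem hc hS _ ?_
          constructor
          · rintro ⟨h1, h2, h3⟩
            refine ⟨⟨by omega, by omega, by omega, by omega, ?_⟩, by omega, by omega, by omega, by omega, ?_⟩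
            · rw [show row + (0:Int) = row from by ring]; exact h2
            · rw [show row + 2*(0:Int) = row from by ring, show col + 2*(1:Int) = col + 2 from by ring]; exact h3
          · rintro ⟨⟨-, -, -, h4, h2⟩, -, -, -, h5, h3⟩
            rw [show row + (0:Int) = row from by ring] at h2
            rw [show row + 2*(0:Int) = row from by ring, show col + 2*(1:Int) = col + 2 from by ring] at h3
            exact ⟨by omega, h2, h3⟩
        have e2 : pvInd (row + 2 < (b.length : Int) ∧ pvCell b (row+1) col = "O" ∧ pvCell b (row+2) col = "S")
            = pvSchk (pvG b) 1 0 row col := by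
          refine pvInd_schk b row col 1 0 hmem hc hS _ ?_
          constructor
          · rintro ⟨h1, h2, h3⟩
            refine ⟨⟨by omega, by omega, by omega, by omega, ?_⟩, by omega, by omega, by omega, by omega, ?_⟩
            · rw [show col + (0:Int) = col from by ring]; exact h2
            · rw [show col + 2*(0:Int) = col from by ring, show row + 2*(1:Int) = row + 2 from by ring]; exact h3
          · rintro ⟨⟨-, h4, -, -, h2⟩, -, h5, -, -, h3⟩
            rw [show col + (0:Int) = col from by ring] at h2
            rw [show col + 2*(0:Int) = col from by ring, show row + 2*(1:Int) = row + 2 from by ring] at h3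
            exact ⟨by omega, h2, h3⟩
        have e3 : pvInd (row + 2 < (b.length : Int) ∧ col + 2 < pvCols b ∧ pvCell b (row+1) (col+1) = "O" ∧ pvCell b (row+2) (col+2) = "S")
            = pvSchk (pvG b) 1 1 row col := by
          refine pvInd_schk b row col 1 1 hmem hc hS _ ?_
          constructor
          · rintro ⟨h1, h1', h2, h3⟩
            refine ⟨⟨by omega, by omega, by omega, by omega, h2⟩, by omega, by omega, by omega, by omega, ?_⟩
            rw [show row + 2*(1:Int) = row + 2 from by ring, show col + 2*(1:Int) = col + 2 from by ring]; exact h3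
          · rintro ⟨⟨-, -, -, -, h2⟩, -, h4, -, h5, h3⟩
            rw [show row + 2*(1:Int) = row + 2 from by ring, show col + 2*(1:Int) = col + 2 from by ring] at h3
            exact ⟨by omega, by omega, h2, h3⟩
        have e4 : pvInd (row + 2 < (b.length : Int) ∧ col - 2 ≥ 0 ∧ pvCell b (row+1) (col-1) = "O" ∧ pvCell b (row+2) (col-2) = "S")
            = pvSchk (pvG b) 1 (-1) row col := by
          refine pvInd_schk b row col 1 (-1) hmem hc hS _ ?_
          constructor
          · rintro ⟨h1, h1', h2, h3⟩
            refine ⟨⟨by omega, by omega, by omega, by omega, ?_⟩, by omega, by omega, by omega, by omega, ?_⟩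
            · rw [show col + (-1:Int) = col - 1 from by ring]; exact h2
            · rw [show row + 2*(1:Int) = row + 2 from by ring, show col + 2*(-1:Int) = col - 2 from by ring]; exact h3
          · rintro ⟨⟨-, -, h4, -, h2⟩, -, h5, h6, -, h3⟩
            rw [show col + (-1:Int) = col - 1 from by ring] at h2
            rw [show row + 2*(1:Int) = row + 2 from by ring, show col + 2*(-1:Int) = col - 2 from by ring] at h3
            exact ⟨by omega, by omega, h2, h3⟩
        have hne : pvG b row col ≠ some "O" := by simp [hgS]
        unfold pvContrib
        rw [← e1, ← e2, ← e3, ← e4,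
            pvOchk_zero_of_mid b 0 1 row col hne, pvOchk_zero_of_mid b 1 0 row col hne,
            pvOchk_zero_of_mid b 1 1 row col hne, pvOchk_zero_of_mid b 1 (-1) row col hne]
        simp only [pvInd]
        split_ifs <;> ring
      · rw [if_neg hS]
        by_cases hO : pvCell b row col = "O"
        · rw [if_pos hO]
          have hgO : pvG b row col = some "O" :=
            (pvG_some_iff _ _ _ _).mpr ⟨hmem.1, hmem.2, hc.1, hc.2, hO⟩
          have e5 : pvInd (col - 1 ≥ 0 ∧ col + 1 < pvCols b ∧ pvCell b row (col-1) = "S" ∧ pvCell b row (col+1) = "S")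
              = pvSchk (pvG b) 0 1 (row - 0) (col - 1) := by
            refine pvInd_ochk b row col 0 1 hmem hc hO _ ?_
            constructor
            · rintro ⟨h1, h1', h2, h3⟩
              refine ⟨⟨by omega, by omega, by omega, by omega, ?_⟩, by omega, by omega, by omega, by omega, ?_⟩
              · rw [show row - (0:Int) = row from by ring]; exact h2
              · rw [show row + (0:Int) = row from by ring]; exact h3
            · rintro ⟨⟨-, -, h4, -, h2⟩, -, -, -, h5, h3⟩
              rw [show row - (0:Int) = row from by ring] at h2
              rw [show row + (0:Int) = row from by ring] at h3
              exact ⟨by omega, by omega, h2, h3⟩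
          have e6 : pvInd (row - 1 ≥ 0 ∧ row + 1 < (b.length : Int) ∧ pvCell b (row-1) col = "S" ∧ pvCell b (row+1) col = "S")
              = pvSchk (pvG b) 1 0 (row - 1) (col - 0) := by
            refine pvInd_ochk b row col 1 0 hmem hc hO _ ?_
            constructor
            · rintro ⟨h1, h1', h2, h3⟩
              refine ⟨⟨by omega, by omega, by omega, by omega, ?_⟩, by omega, by omega, by omega, by omega, ?_⟩
              · rw [show col - (0:Int) = col from by ring]; exact h2
              · rw [show col + (0:Int) = col from by ring]; exact h3
            · rintro ⟨⟨h4, -, -, -, h2⟩, -, h5, -, -, h3⟩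
              rw [show col - (0:Int) = col from by ring] at h2
              rw [show col + (0:Int) = col from by ring] at h3
              exact ⟨by omega, by omega, h2, h3⟩
          have e7 : pvInd (row - 1 ≥ 0 ∧ row + 1 < (b.length : Int) ∧ col - 1 ≥ 0 ∧ col + 1 < pvCols b ∧ pvCell b (row-1) (col-1) = "S" ∧ pvCell b (row+1) (col+1) = "S")
              = pvSchk (pvG b) 1 1 (row - 1) (col - 1) := by
            refine pvInd_ochk b row col 1 1 hmem hc hO _ ?_
            constructor
            · rintro ⟨h1, h1', h1'', h1''', h2, h3⟩
              exact ⟨⟨by omega, by omega, by omega, by omega, h2⟩, by omega, by omega, by omega, by omega, h3⟩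
            · rintro ⟨⟨h4, -, h6, -, h2⟩, -, h5, -, h7, h3⟩
              exact ⟨by omega, by omega, by omega, by omega, h2, h3⟩
          have e8 : pvInd (row - 1 ≥ 0 ∧ row + 1 < (b.length : Int) ∧ col + 1 < pvCols b ∧ col - 1 ≥ 0 ∧ pvCell b (row-1) (col+1) = "S" ∧ pvCell b (row+1) (col-1) = "S")
              = pvSchk (pvG b) 1 (-1) (row - 1) (col - (-1)) := by
            refine pvInd_ochk b row col 1 (-1) hmem hc hO _ ?_
            constructor
            · rintro ⟨h1, h1', h1'', h1''', h2, h3⟩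
              refine ⟨⟨by omega, by omega, by omega, by omega, ?_⟩, by omega, by omega, by omega, by omega, ?_⟩
              · rw [show col - (-1:Int) = col + 1 from by ring]; exact h2
              · rw [show col + (-1:Int) = col - 1 from by ring]; exact h3
            · rintro ⟨⟨h4, -, -, h6, h2⟩, -, h5, h7, -, h3⟩
              rw [show col - (-1:Int) = col + 1 from by ring] at h2
              rw [show col + (-1:Int) = col - 1 from by ring] at h3
              exact ⟨by omega, by omega, by omega, by omega, h2, h3⟩
          have hne : pvG b row col ≠ some "S" := by simp [hgO]
          unfold pvContrib pvOchk
          rw [← e5, ← e6, ← e7, ← e8,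
              pvSchk_zero_of_anchor b 0 1 row col hne, pvSchk_zero_of_anchor b 1 0 row col hne,
              pvSchk_zero_of_anchor b 1 1 row col hne, pvSchk_zero_of_anchor b 1 (-1) row col hne]
          simp only [pvInd]
          split_ifs <;> ring
        · rw [if_neg hO]
          have hsne : pvG b row col ≠ some "S" := by
            intro h; rw [pvG_some_iff] at h; exact hS h.2.2.2.2
          have hone : pvG b row col ≠ some "O" := by
            intro h; rw [pvG_some_iff] at h; exact hO h.2.2.2.2
          unfold pvContrib
          rw [pvSchk_zero_of_anchor b 0 1 row col hsne, pvSchk_zero_of_anchor b 1 0 row col hsne,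
              pvSchk_zero_of_anchor b 1 1 row col hsne, pvSchk_zero_of_anchor b 1 (-1) row col hsne,
              pvOchk_zero_of_mid b 0 1 row col hone, pvOchk_zero_of_mid b 1 0 row col hone,
              pvOchk_zero_of_mid b 1 1 row col hone, pvOchk_zero_of_mid b 1 (-1) row col hone]
          ring
    rw [PySem.List.foldl_add, sum_pyRange_int]
  rw [PySem.List.foldl_add, sum_pyRange_int]
  unfold pvGrid
  rw [Finset.sum_product]
  simp

-- bridge: port B's base is the (doubled) grid sum of S-checks
lemma pvBase_eq (b : List (List String)) :
    pvBase b = 2 * (pvSS b 0 1 + pvSS b 1 0 + pvSS b 1 1 + pvSS b 1 (-1)) := by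
  have hax : ∀ (base r c : Int),
      pvAxes.foldl (fun base d =>
        if pvG b r c = some "S" ∧ pvG b (r + d.1) (c + d.2) = some "O"
            ∧ pvG b (r + 2 * d.1) (c + 2 * d.2) = some "S" then base + 2 else base) base
      = base + 2 * (pvSchk (pvG b) 0 1 r c + pvSchk (pvG b) 1 0 r c
          + pvSchk (pvG b) 1 1 r c + pvSchk (pvG b) 1 (-1) r c) := by
    intro base r c
    simp only [pvAxes, List.foldl]
    simp only [pvSchk, pvInd]
    split_ifs <;> ring
  have hcol : ∀ (base r : Int),
      (PySem.List.pyRange 0 (pvCols b) 1).foldl (fun base c =>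
        pvAxes.foldl (fun base d =>
          if pvG b r c = some "S" ∧ pvG b (r + d.1) (c + d.2) = some "O"
              ∧ pvG b (r + 2 * d.1) (c + 2 * d.2) = some "S" then base + 2 else base) base) base
      = base + ∑ c ∈ Finset.Icc 0 (pvCols b - 1),
          2 * (pvSchk (pvG b) 0 1 r c + pvSchk (pvG b) 1 0 r c
            + pvSchk (pvG b) 1 1 r c + pvSchk (pvG b) 1 (-1) r c) := by
    intro base r
    rw [PySem.List.foldl_congr_mem _ _
      (fun base c => base + 2 * (pvSchk (pvG b) 0 1 r c + pvSchk (pvG b) 1 0 r c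
        + pvSchk (pvG b) 1 1 r c + pvSchk (pvG b) 1 (-1) r c)) _
      (fun acc x _ => hax acc r x)]
    rw [PySem.List.foldl_add, sum_pyRange_int]
  unfold pvBase
  rw [PySem.List.foldl_congr_mem _ _
    (fun base r => base + ∑ c ∈ Finset.Icc 0 (pvCols b - 1),
        2 * (pvSchk (pvG b) 0 1 r c + pvSchk (pvG b) 1 0 r c
          + pvSchk (pvG b) 1 1 r c + pvSchk (pvG b) 1 (-1) r c)) _
    (fun acc x _ => hcol acc x)]
  rw [PySem.List.foldl_add, sum_pyRange_int]
  unfold pvSS pvGrid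
  simp only [PySem.List.len_eq, Finset.sum_product]
  simp only [mul_add, Finset.sum_add_distrib, ← Finset.mul_sum]
  ring

-- the updated board: same shape, one cell replaced
lemma pvSet_shape (b : List (List String)) (i j : Int) (ch : String)
    (hpre : Pre_fuzzy_move b) (hi : 0 ≤ i ∧ i < (b.length : Int)) (hj : 0 ≤ j ∧ j < pvCols b) :
    ((PySem.List.pySetD b i (PySem.List.pySetD (PySem.List.pyGetD b i []) j ch)).length : Int)
        = (b.length : Int)
    ∧ pvCols (PySem.List.pySetD b i (PySem.List.pySetD (PySem.List.pyGetD b i []) j ch)) = pvCols b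
    ∧ ∀ r c : Int, pvG (PySem.List.pySetD b i (PySem.List.pySetD (PySem.List.pyGetD b i []) j ch)) r c
        = if r = i ∧ c = j then some ch else pvG b r c := by
  have hbne : b ≠ [] := by intro h; subst h; simp at hi; omega
  have hnl : i.toNat < b.length := by omega
  have hrw : PySem.List.pySetD b i (PySem.List.pySetD (PySem.List.pyGetD b i []) j ch)
      = b.set i.toNat ((b[i.toNat]).set j.toNat ch) := by
    rw [PySem.List.pyGetD_eq_getElem b [] hi.1 (by exact_mod_cast hi.2),
        PySem.List.pySetD_of_nonneg _ _ hj.1, PySem.List.pySetD_of_nonneg _ _ hi.1]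
  have hcolsrow : ∀ (k : Nat) (hk : k < b.length), pvCols b ≤ (b[k].length : Int) := by
    intro k hk
    have hmem : b[k] ∈ b := List.getElem_mem hk
    have := hpre _ hmem
    have hhd : pvCols b = ((b.headD []).length : Int) := by
      cases b with
      | nil => exact absurd rfl hbne
      | cons x t => simp [pvCols, PySem.List.pyGetD_zero_cons]
    omega
  have hlen : ((PySem.List.pySetD b i (PySem.List.pySetD (PySem.List.pyGetD b i []) j ch)).length : Int)
      = (b.length : Int) := by
    rw [hrw]; simp
  have hjrow : j.toNat < b[i.toNat].length := by
    have := hcolsrow i.toNat hnl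
    omega
  have hcols : pvCols (PySem.List.pySetD b i (PySem.List.pySetD (PySem.List.pyGetD b i []) j ch)) = pvCols b := by
    rw [hrw, pvCols_eq', pvCols_eq', PySem.List.pyGetD_zero, PySem.List.pyGetD_zero,
        List.getD_eq_getElem?_getD, List.getD_eq_getElem?_getD, List.getElem?_set]
    by_cases h0 : i.toNat = 0
    · rw [if_pos h0, if_pos (by omega)]
      have : b[0]? = some b[i.toNat] := by
        rw [← h0]; exact (List.getElem?_eq_getElem hnl)
      rw [this]
      simp
    · rw [if_neg h0]
  refine ⟨hlen, hcols, ?_⟩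
  intro r c
  unfold pvG
  simp only [PySem.List.len_eq]
  simp only [hlen, hcols]
  by_cases hb : 0 ≤ r ∧ r < (b.length : Int) ∧ 0 ≤ c ∧ c < pvCols b
  · have hrnl : r.toNat < b.length := by omega
    have hcell : pvCell (PySem.List.pySetD b i (PySem.List.pySetD (PySem.List.pyGetD b i []) j ch)) r c
        = if r = i ∧ c = j then ch else pvCell b r c := by
      unfold pvCell
      rw [hrw]
      rw [PySem.List.pyGetD_eq_getElem (b.set i.toNat (b[i.toNat].set j.toNat ch)) [] hb.1
        (by simp only [List.length_set]; omega)]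
      rw [List.getElem_set (by simp only [List.length_set]; omega)]
      rw [PySem.List.pyGetD_eq_getElem b [] hb.1 (by omega)]
      by_cases hri : i.toNat = r.toNat
      · rw [if_pos hri]
        rw [PySem.List.pyGetD_eq_getElem _ "" hb.2.2.1
          (by have := hcolsrow i.toNat hnl; simp only [List.length_set]; omega)]
        rw [List.getElem_set (by have := hcolsrow i.toNat hnl; simp only [List.length_set]; omega)]
        by_cases hcj : j.toNat = c.toNat
        · rw [if_pos hcj, if_pos ⟨by omega, by omega⟩]
        · rw [if_neg hcj, if_neg (by rintro ⟨-, rfl⟩; omega)]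
          rw [PySem.List.pyGetD_eq_getElem _ "" hb.2.2.1
            (by have := hcolsrow r.toNat hrnl; omega)]
          simp only [hri]
      · rw [if_neg hri, if_neg (by rintro ⟨rfl, -⟩; omega)]
    rw [if_pos hb, hcell]
    split_ifs with h
    · rfl
    · rfl
  · rw [if_neg hb]
    rw [if_neg (by rintro ⟨rfl, rfl⟩; exact hb ⟨hi.1, hi.2, hj.1, hj.2⟩)]
    try rw [if_neg hb]

-- change of one S-check sum under placing ch on the empty cell (i, j)
lemma pvSS_set (b : List (List String)) (i j : Int) (ch : String) (dr dc : Int)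
    (hpre : Pre_fuzzy_move b) (hi : 0 ≤ i ∧ i < (b.length : Int)) (hj : 0 ≤ j ∧ j < pvCols b)
    (hcell : pvCell b i j = "") (hd : ¬ (dr = 0 ∧ dc = 0)) :
    pvSS (PySem.List.pySetD b i (PySem.List.pySetD (PySem.List.pyGetD b i []) j ch)) dr dc
      = pvSS b dr dc
        + pvInd (ch = "S" ∧ pvG b (i + dr) (j + dc) = some "O" ∧ pvG b (i + 2 * dr) (j + 2 * dc) = some "S")
        + pvInd (pvG b (i - dr) (j - dc) = some "S" ∧ ch = "O" ∧ pvG b (i + dr) (j + dc) = some "S")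
        + pvInd (pvG b (i - 2 * dr) (j - 2 * dc) = some "S" ∧ pvG b (i - dr) (j - dc) = some "O" ∧ ch = "S") := by
  obtain ⟨hlen, hcols, hg⟩ := pvSet_shape b i j ch hpre hi hj
  have hgrid : pvGrid (PySem.List.pySetD b i (PySem.List.pySetD (PySem.List.pyGetD b i []) j ch)) = pvGrid b := by
    unfold pvGrid; rw [hlen, hcols]
  have hgq : pvG b i j = some "" := (pvG_some_iff _ _ _ _).mpr ⟨hi.1, hi.2, hj.1, hj.2, hcell⟩
  unfold pvSS
  rw [hgrid]
  set b' := PySem.List.pySetD b i (PySem.List.pySetD (PySem.List.pyGetD b i []) j ch) with hb'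
  set S3 : Finset (Int × Int) := {(i, j), (i - dr, j - dc), (i - 2*dr, j - 2*dc)} with hS3
  have hsubS3 : S3 ⊆ pvGrid b ∪ S3 := Finset.subset_union_right
  have hsubG : pvGrid b ⊆ pvGrid b ∪ S3 := Finset.subset_union_left
  have hvan' : ∀ x ∈ pvGrid b ∪ S3, x ∉ pvGrid b → pvSchk (pvG b') dr dc x.1 x.2 = 0 := by
    intro x _ hx
    refine pvSchk_zero_of_anchor b' dr dc x.1 x.2 ?_
    rw [hg]
    rw [if_neg (by
      rintro ⟨h1', h2'⟩
      apply hx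
      rw [mem_pvGrid, h1', h2']
      exact ⟨hi.1, hi.2, hj.1, hj.2⟩)]
    intro hsome
    rw [pvG_some_iff] at hsome
    exact hx ((mem_pvGrid b x).mpr ⟨hsome.1, hsome.2.1, hsome.2.2.1, hsome.2.2.2.1⟩)
  have hvan : ∀ x ∈ pvGrid b ∪ S3, x ∉ pvGrid b → pvSchk (pvG b) dr dc x.1 x.2 = 0 :=
    fun x _ hx => pvSchk_zero_of_notMem b dr dc x hx
  have h1 : ∑ p ∈ pvGrid b, pvSchk (pvG b') dr dc p.1 p.2
      = ∑ p ∈ pvGrid b ∪ S3, pvSchk (pvG b') dr dc p.1 p.2 := Finset.sum_subset hsubG hvan'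
  have h2 : ∑ p ∈ pvGrid b, pvSchk (pvG b) dr dc p.1 p.2
      = ∑ p ∈ pvGrid b ∪ S3, pvSchk (pvG b) dr dc p.1 p.2 := Finset.sum_subset hsubG hvan
  have hdiffzero : ∀ x ∈ pvGrid b ∪ S3, x ∉ S3 →
      pvSchk (pvG b') dr dc x.1 x.2 - pvSchk (pvG b) dr dc x.1 x.2 = 0 := by
    intro x _ hx
    simp only [hS3, Finset.mem_insert, Finset.mem_singleton] at hx
    simp only [not_or] at hx
    obtain ⟨hx1, hx2, hx3⟩ := hx
    have e1 : ¬(x.1 = i ∧ x.2 = j) := by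
      rintro ⟨h1', h2'⟩; exact hx1 (Prod.ext h1' h2')
    have e2 : ¬(x.1 + dr = i ∧ x.2 + dc = j) := by
      rintro ⟨h1', h2'⟩; apply hx2; apply Prod.ext <;> simp <;> omega
    have e3 : ¬(x.1 + 2*dr = i ∧ x.2 + 2*dc = j) := by
      rintro ⟨h1', h2'⟩; apply hx3; apply Prod.ext <;> simp <;> omega
    unfold pvSchk
    rw [hg, hg, hg, if_neg e1, if_neg e2, if_neg e3]
    ring
  have h3 : ∑ p ∈ pvGrid b ∪ S3, (pvSchk (pvG b') dr dc p.1 p.2 - pvSchk (pvG b) dr dc p.1 p.2)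
      = ∑ p ∈ S3, (pvSchk (pvG b') dr dc p.1 p.2 - pvSchk (pvG b) dr dc p.1 p.2) :=
    (Finset.sum_subset hsubS3 hdiffzero).symm
  have hne1 : ((i, j) : Int × Int) ≠ (i - dr, j - dc) := by
    intro h; rw [Prod.ext_iff] at h; simp at h; omega
  have hne2 : ((i, j) : Int × Int) ≠ (i - 2*dr, j - 2*dc) := by
    intro h; rw [Prod.ext_iff] at h; simp at h; omega
  have hne3 : ((i - dr, j - dc) : Int × Int) ≠ (i - 2*dr, j - 2*dc) := by
    intro h; rw [Prod.ext_iff] at h; simp at h; omega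
  have hS3sum : ∀ f : Int × Int → Int,
      ∑ p ∈ S3, f p = f (i, j) + f (i - dr, j - dc) + f (i - 2*dr, j - 2*dc) := by
    intro f
    rw [hS3, Finset.sum_insert (by simp [hne1, hne2]), Finset.sum_insert (by simp [hne3]),
        Finset.sum_singleton]
    ring
  have hp1 : pvSchk (pvG b') dr dc i j - pvSchk (pvG b) dr dc i j
      = pvInd (ch = "S" ∧ pvG b (i + dr) (j + dc) = some "O" ∧ pvG b (i + 2 * dr) (j + 2 * dc) = some "S") := by
    have hold : pvSchk (pvG b) dr dc i j = 0 :=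
      pvSchk_zero_of_anchor b dr dc i j (by rw [hgq]; simp)
    have r0 : pvG b' i j = some ch := by rw [hg]; exact if_pos ⟨rfl, rfl⟩
    have r1 : pvG b' (i + dr) (j + dc) = pvG b (i + dr) (j + dc) := by
      rw [hg]; exact if_neg (by rintro ⟨h1', h2'⟩; omega)
    have r2 : pvG b' (i + 2*dr) (j + 2*dc) = pvG b (i + 2*dr) (j + 2*dc) := by
      rw [hg]; exact if_neg (by rintro ⟨h1', h2'⟩; omega)
    have hnew : pvSchk (pvG b') dr dc i j
        = pvInd (ch = "S" ∧ pvG b (i + dr) (j + dc) = some "O" ∧ pvG b (i + 2 * dr) (j + 2 * dc) = some "S") := by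
      unfold pvSchk
      apply pvInd_congr
      rw [r0, r1, r2]
      simp
    rw [hnew, hold]
    ring
  have hp2 : pvSchk (pvG b') dr dc (i - dr) (j - dc) - pvSchk (pvG b) dr dc (i - dr) (j - dc)
      = pvInd (pvG b (i - dr) (j - dc) = some "S" ∧ ch = "O" ∧ pvG b (i + dr) (j + dc) = some "S") := by
    have hold : pvSchk (pvG b) dr dc (i - dr) (j - dc) = 0 := by
      apply pvInd_false
      rintro ⟨-, h2', -⟩
      rw [show i - dr + dr = i from by ring, show j - dc + dc = j from by ring, hgq] at h2'
      simp at h2'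
    have r0 : pvG b' (i - dr) (j - dc) = pvG b (i - dr) (j - dc) := by
      rw [hg]; exact if_neg (by rintro ⟨h1', h2'⟩; omega)
    have r1 : pvG b' (i - dr + dr) (j - dc + dc) = some ch := by
      rw [show i - dr + dr = i from by ring, show j - dc + dc = j from by ring, hg]
      exact if_pos ⟨rfl, rfl⟩
    have r2 : pvG b' (i - dr + 2*dr) (j - dc + 2*dc) = pvG b (i + dr) (j + dc) := by
      rw [show i - dr + 2*dr = i + dr from by ring, show j - dc + 2*dc = j + dc from by ring, hg]
      exact if_neg (by rintro ⟨h1', h2'⟩; omega)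
    have hnew : pvSchk (pvG b') dr dc (i - dr) (j - dc)
        = pvInd (pvG b (i - dr) (j - dc) = some "S" ∧ ch = "O" ∧ pvG b (i + dr) (j + dc) = some "S") := by
      unfold pvSchk
      apply pvInd_congr
      rw [r0, r1, r2]
      simp
    rw [hnew, hold]
    ring
  have hp3 : pvSchk (pvG b') dr dc (i - 2*dr) (j - 2*dc) - pvSchk (pvG b) dr dc (i - 2*dr) (j - 2*dc)
      = pvInd (pvG b (i - 2 * dr) (j - 2 * dc) = some "S" ∧ pvG b (i - dr) (j - dc) = some "O" ∧ ch = "S") := by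
    have hold : pvSchk (pvG b) dr dc (i - 2*dr) (j - 2*dc) = 0 := by
      apply pvInd_false
      rintro ⟨-, -, h3'⟩
      rw [show i - 2*dr + 2*dr = i from by ring, show j - 2*dc + 2*dc = j from by ring, hgq] at h3'
      simp at h3'
    have r0 : pvG b' (i - 2*dr) (j - 2*dc) = pvG b (i - 2*dr) (j - 2*dc) := by
      rw [hg]; exact if_neg (by rintro ⟨h1', h2'⟩; omega)
    have r1 : pvG b' (i - 2*dr + dr) (j - 2*dc + dc) = pvG b (i - dr) (j - dc) := by
      rw [show i - 2*dr + dr = i - dr from by ring, show j - 2*dc + dc = j - dc from by ring, hg]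
      exact if_neg (by rintro ⟨h1', h2'⟩; omega)
    have r2 : pvG b' (i - 2*dr + 2*dr) (j - 2*dc + 2*dc) = some ch := by
      rw [show i - 2*dr + 2*dr = i from by ring, show j - 2*dc + 2*dc = j from by ring, hg]
      exact if_pos ⟨rfl, rfl⟩
    have hnew : pvSchk (pvG b') dr dc (i - 2*dr) (j - 2*dc)
        = pvInd (pvG b (i - 2 * dr) (j - 2 * dc) = some "S" ∧ pvG b (i - dr) (j - dc) = some "O" ∧ ch = "S") := by
      unfold pvSchk
      apply pvInd_congr
      rw [r0, r1, r2]
      simp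
    rw [hnew, hold]
    ring
  have key : ∑ p ∈ pvGrid b, pvSchk (pvG b') dr dc p.1 p.2
      - ∑ p ∈ pvGrid b, pvSchk (pvG b) dr dc p.1 p.2
      = pvInd (ch = "S" ∧ pvG b (i + dr) (j + dc) = some "O" ∧ pvG b (i + 2 * dr) (j + 2 * dc) = some "S")
      + pvInd (pvG b (i - dr) (j - dc) = some "S" ∧ ch = "O" ∧ pvG b (i + dr) (j + dc) = some "S")
      + pvInd (pvG b (i - 2 * dr) (j - 2 * dc) = some "S" ∧ pvG b (i - dr) (j - dc) = some "O" ∧ ch = "S") := by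
    rw [h1, h2, ← Finset.sum_sub_distrib, h3,
        hS3sum (fun p => pvSchk (pvG b') dr dc p.1 p.2 - pvSchk (pvG b) dr dc p.1 p.2)]
    dsimp only
    rw [hp1, hp2, hp3]
  omega

lemma pvDelta_S_eq (b : List (List String)) (i j : Int) :
    pvDelta b i j "S" = 2 * (
      pvInd (pvG b (i + 0) (j + 1) = some "O" ∧ pvG b (i + 2 * 0) (j + 2 * 1) = some "S")
    + pvInd (pvG b (i + -0) (j + -1) = some "O" ∧ pvG b (i + 2 * -0) (j + 2 * -1) = some "S")
    + pvInd (pvG b (i + 1) (j + 0) = some "O" ∧ pvG b (i + 2 * 1) (j + 2 * 0) = some "S")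
    + pvInd (pvG b (i + -1) (j + -0) = some "O" ∧ pvG b (i + 2 * -1) (j + 2 * -0) = some "S")
    + pvInd (pvG b (i + 1) (j + 1) = some "O" ∧ pvG b (i + 2 * 1) (j + 2 * 1) = some "S")
    + pvInd (pvG b (i + -1) (j + -1) = some "O" ∧ pvG b (i + 2 * -1) (j + 2 * -1) = some "S")
    + pvInd (pvG b (i + 1) (j + -1) = some "O" ∧ pvG b (i + 2 * 1) (j + 2 * -1) = some "S")
    + pvInd (pvG b (i + -1) (j + - -1) = some "O" ∧ pvG b (i + 2 * -1) (j + 2 * - -1) = some "S")) := by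
  have inner : ∀ (k : Int) (d : Int × Int),
      [(d.1, d.2), (-d.1, -d.2)].foldl (fun k s =>
        if pvG b (i + s.1) (j + s.2) = some "O"
            ∧ pvG b (i + 2 * s.1) (j + 2 * s.2) = some "S" then k + 1 else k) k
      = k + (pvInd (pvG b (i + d.1) (j + d.2) = some "O" ∧ pvG b (i + 2 * d.1) (j + 2 * d.2) = some "S")
           + pvInd (pvG b (i + -d.1) (j + -d.2) = some "O" ∧ pvG b (i + 2 * -d.1) (j + 2 * -d.2) = some "S")) := by
    intro k d
    simp only [List.foldl, pvInd]
    split_ifs <;> ring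
  unfold pvDelta
  rw [if_pos rfl]
  rw [PySem.List.foldl_congr_mem _ _
    (fun k d => k + (pvInd (pvG b (i + d.1) (j + d.2) = some "O" ∧ pvG b (i + 2 * d.1) (j + 2 * d.2) = some "S")
      + pvInd (pvG b (i + -d.1) (j + -d.2) = some "O" ∧ pvG b (i + 2 * -d.1) (j + 2 * -d.2) = some "S"))) _
    (fun acc x _ => inner acc x)]
  rw [PySem.List.foldl_add]
  simp only [pvAxes, List.map, List.sum_cons, List.sum_nil]
  ring

lemma pvDelta_O_eq (b : List (List String)) (i j : Int) :
    pvDelta b i j "O" = 2 * (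
      pvInd (pvG b (i - 0) (j - 1) = some "S" ∧ pvG b (i + 0) (j + 1) = some "S")
    + pvInd (pvG b (i - 1) (j - 0) = some "S" ∧ pvG b (i + 1) (j + 0) = some "S")
    + pvInd (pvG b (i - 1) (j - 1) = some "S" ∧ pvG b (i + 1) (j + 1) = some "S")
    + pvInd (pvG b (i - 1) (j - -1) = some "S" ∧ pvG b (i + 1) (j + -1) = some "S")) := by
  have inner : ∀ (k : Int) (d : Int × Int),
      (if pvG b (i - d.1) (j - d.2) = some "S" ∧ pvG b (i + d.1) (j + d.2) = some "S" then k + 1 else k)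
      = k + pvInd (pvG b (i - d.1) (j - d.2) = some "S" ∧ pvG b (i + d.1) (j + d.2) = some "S") := by
    intro k d
    simp only [pvInd]
    split_ifs <;> ring
  unfold pvDelta
  rw [if_neg (show ¬(("O":String) = "S") from by decide)]
  rw [PySem.List.foldl_congr_mem _ _
    (fun k d => k + pvInd (pvG b (i - d.1) (j - d.2) = some "S" ∧ pvG b (i + d.1) (j + d.2) = some "S")) _
    (fun acc x _ => inner acc x)]
  rw [PySem.List.foldl_add]
  simp only [pvAxes, List.map, List.sum_cons, List.sum_nil]
  ring

-- the master lemma: a placement's full re-evaluation is base + local delta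
lemma pvEval_set (b : List (List String)) (i j : Int) (ch : String)
    (hpre : Pre_fuzzy_move b) (hi : 0 ≤ i ∧ i < (b.length : Int)) (hj : 0 ≤ j ∧ j < pvCols b)
    (hcell : pvCell b i j = "") (hch : ch = "S" ∨ ch = "O") :
    pvEvalBoard (PySem.List.pySetD b i (PySem.List.pySetD (PySem.List.pyGetD b i []) j ch))
      = pvBase b + pvDelta b i j ch := by
  rw [pvEval_eq_sum, pvGrid_contrib, pvBase_eq]
  have h01 := pvSS_set b i j ch 0 1 hpre hi hj hcell (by omega)
  have h10 := pvSS_set b i j ch 1 0 hpre hi hj hcell (by omega)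
  have h11 := pvSS_set b i j ch 1 1 hpre hi hj hcell (by omega)
  have h1m := pvSS_set b i j ch 1 (-1) hpre hi hj hcell (by omega)
  rw [h01, h10, h11, h1m]
  rcases hch with rfl | rfl
  · rw [pvDelta_S_eq]
    have hB1 : pvInd (pvG b (i - 0) (j - 1) = some "S" ∧ ("S":String) = "O" ∧ pvG b (i + 0) (j + 1) = some "S") = 0 :=
      pvInd_false (by rintro ⟨-, h, -⟩; exact absurd h (by decide))
    have hB2 : pvInd (pvG b (i - 1) (j - 0) = some "S" ∧ ("S":String) = "O" ∧ pvG b (i + 1) (j + 0) = some "S") = 0 :=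
      pvInd_false (by rintro ⟨-, h, -⟩; exact absurd h (by decide))
    have hB3 : pvInd (pvG b (i - 1) (j - 1) = some "S" ∧ ("S":String) = "O" ∧ pvG b (i + 1) (j + 1) = some "S") = 0 :=
      pvInd_false (by rintro ⟨-, h, -⟩; exact absurd h (by decide))
    have hB4 : pvInd (pvG b (i - 1) (j - -1) = some "S" ∧ ("S":String) = "O" ∧ pvG b (i + 1) (j + -1) = some "S") = 0 :=
      pvInd_false (by rintro ⟨-, h, -⟩; exact absurd h (by decide))
    have hA1 : pvInd (("S":String) = "S" ∧ pvG b (i + 0) (j + 1) = some "O" ∧ pvG b (i + 2 * 0) (j + 2 * 1) = some "S")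
        = pvInd (pvG b (i + 0) (j + 1) = some "O" ∧ pvG b (i + 2 * 0) (j + 2 * 1) = some "S") :=
      pvInd_congr (by simp)
    have hA2 : pvInd (("S":String) = "S" ∧ pvG b (i + 1) (j + 0) = some "O" ∧ pvG b (i + 2 * 1) (j + 2 * 0) = some "S")
        = pvInd (pvG b (i + 1) (j + 0) = some "O" ∧ pvG b (i + 2 * 1) (j + 2 * 0) = some "S") :=
      pvInd_congr (by simp)
    have hA3 : pvInd (("S":String) = "S" ∧ pvG b (i + 1) (j + 1) = some "O" ∧ pvG b (i + 2 * 1) (j + 2 * 1) = some "S")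
        = pvInd (pvG b (i + 1) (j + 1) = some "O" ∧ pvG b (i + 2 * 1) (j + 2 * 1) = some "S") :=
      pvInd_congr (by simp)
    have hA4 : pvInd (("S":String) = "S" ∧ pvG b (i + 1) (j + -1) = some "O" ∧ pvG b (i + 2 * 1) (j + 2 * -1) = some "S")
        = pvInd (pvG b (i + 1) (j + -1) = some "O" ∧ pvG b (i + 2 * 1) (j + 2 * -1) = some "S") :=
      pvInd_congr (by simp)
    have hC1 : pvInd (pvG b (i - 2 * 0) (j - 2 * 1) = some "S" ∧ pvG b (i - 0) (j - 1) = some "O" ∧ ("S":String) = "S")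
        = pvInd (pvG b (i + -0) (j + -1) = some "O" ∧ pvG b (i + 2 * -0) (j + 2 * -1) = some "S") := by
      apply pvInd_congr
      rw [show i + -(0:Int) = i - 0 from by ring, show j + -(1:Int) = j - 1 from by ring,
          show i + 2 * -(0:Int) = i - 2 * 0 from by ring, show j + 2 * -(1:Int) = j - 2 * 1 from by ring]
      constructor
      · rintro ⟨u, v, -⟩; exact ⟨v, u⟩
      · rintro ⟨v, u⟩; exact ⟨u, v, rfl⟩
    have hC2 : pvInd (pvG b (i - 2 * 1) (j - 2 * 0) = some "S" ∧ pvG b (i - 1) (j - 0) = some "O" ∧ ("S":String) = "S")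
        = pvInd (pvG b (i + -1) (j + -0) = some "O" ∧ pvG b (i + 2 * -1) (j + 2 * -0) = some "S") := by
      apply pvInd_congr
      rw [show i + -(1:Int) = i - 1 from by ring, show j + -(0:Int) = j - 0 from by ring,
          show i + 2 * -(1:Int) = i - 2 * 1 from by ring, show j + 2 * -(0:Int) = j - 2 * 0 from by ring]
      constructor
      · rintro ⟨u, v, -⟩; exact ⟨v, u⟩
      · rintro ⟨v, u⟩; exact ⟨u, v, rfl⟩
    have hC3 : pvInd (pvG b (i - 2 * 1) (j - 2 * 1) = some "S" ∧ pvG b (i - 1) (j - 1) = some "O" ∧ ("S":String) = "S")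
        = pvInd (pvG b (i + -1) (j + -1) = some "O" ∧ pvG b (i + 2 * -1) (j + 2 * -1) = some "S") := by
      apply pvInd_congr
      rw [show i + -(1:Int) = i - 1 from by ring, show j + -(1:Int) = j - 1 from by ring,
          show i + 2 * -(1:Int) = i - 2 * 1 from by ring, show j + 2 * -(1:Int) = j - 2 * 1 from by ring]
      constructor
      · rintro ⟨u, v, -⟩; exact ⟨v, u⟩
      · rintro ⟨v, u⟩; exact ⟨u, v, rfl⟩
    have hC4 : pvInd (pvG b (i - 2 * 1) (j - 2 * -1) = some "S" ∧ pvG b (i - 1) (j - -1) = some "O" ∧ ("S":String) = "S")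
        = pvInd (pvG b (i + -1) (j + - -1) = some "O" ∧ pvG b (i + 2 * -1) (j + 2 * - -1) = some "S") := by
      apply pvInd_congr
      rw [show i + -(1:Int) = i - 1 from by ring, show j + - -(1:Int) = j - -1 from by ring,
          show i + 2 * -(1:Int) = i - 2 * 1 from by ring, show j + 2 * - -(1:Int) = j - 2 * -1 from by ring]
      constructor
      · rintro ⟨u, v, -⟩; exact ⟨v, u⟩
      · rintro ⟨v, u⟩; exact ⟨u, v, rfl⟩
    rw [hB1, hB2, hB3, hB4, hA1, hA2, hA3, hA4, hC1, hC2, hC3, hC4]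
    ring
  · rw [pvDelta_O_eq]
    have hA1 : pvInd (("O":String) = "S" ∧ pvG b (i + 0) (j + 1) = some "O" ∧ pvG b (i + 2 * 0) (j + 2 * 1) = some "S") = 0 :=
      pvInd_false (by rintro ⟨h, -, -⟩; exact absurd h (by decide))
    have hA2 : pvInd (("O":String) = "S" ∧ pvG b (i + 1) (j + 0) = some "O" ∧ pvG b (i + 2 * 1) (j + 2 * 0) = some "S") = 0 :=
      pvInd_false (by rintro ⟨h, -, -⟩; exact absurd h (by decide))
    have hA3 : pvInd (("O":String) = "S" ∧ pvG b (i + 1) (j + 1) = some "O" ∧ pvG b (i + 2 * 1) (j + 2 * 1) = some "S") = 0 :=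
      pvInd_false (by rintro ⟨h, -, -⟩; exact absurd h (by decide))
    have hA4 : pvInd (("O":String) = "S" ∧ pvG b (i + 1) (j + -1) = some "O" ∧ pvG b (i + 2 * 1) (j + 2 * -1) = some "S") = 0 :=
      pvInd_false (by rintro ⟨h, -, -⟩; exact absurd h (by decide))
    have hC1 : pvInd (pvG b (i - 2 * 0) (j - 2 * 1) = some "S" ∧ pvG b (i - 0) (j - 1) = some "O" ∧ ("O":String) = "S") = 0 :=
      pvInd_false (by rintro ⟨-, -, h⟩; exact absurd h (by decide))
    have hC2 : pvInd (pvG b (i - 2 * 1) (j - 2 * 0) = some "S" ∧ pvG b (i - 1) (j - 0) = some "O" ∧ ("O":String) = "S") = 0 :=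
      pvInd_false (by rintro ⟨-, -, h⟩; exact absurd h (by decide))
    have hC3 : pvInd (pvG b (i - 2 * 1) (j - 2 * 1) = some "S" ∧ pvG b (i - 1) (j - 1) = some "O" ∧ ("O":String) = "S") = 0 :=
      pvInd_false (by rintro ⟨-, -, h⟩; exact absurd h (by decide))
    have hC4 : pvInd (pvG b (i - 2 * 1) (j - 2 * -1) = some "S" ∧ pvG b (i - 1) (j - -1) = some "O" ∧ ("O":String) = "S") = 0 :=
      pvInd_false (by rintro ⟨-, -, h⟩; exact absurd h (by decide))
    have hB1 : pvInd (pvG b (i - 0) (j - 1) = some "S" ∧ ("O":String) = "O" ∧ pvG b (i + 0) (j + 1) = some "S")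
        = pvInd (pvG b (i - 0) (j - 1) = some "S" ∧ pvG b (i + 0) (j + 1) = some "S") := pvInd_congr (by simp)
    have hB2 : pvInd (pvG b (i - 1) (j - 0) = some "S" ∧ ("O":String) = "O" ∧ pvG b (i + 1) (j + 0) = some "S")
        = pvInd (pvG b (i - 1) (j - 0) = some "S" ∧ pvG b (i + 1) (j + 0) = some "S") := pvInd_congr (by simp)
    have hB3 : pvInd (pvG b (i - 1) (j - 1) = some "S" ∧ ("O":String) = "O" ∧ pvG b (i + 1) (j + 1) = some "S")
        = pvInd (pvG b (i - 1) (j - 1) = some "S" ∧ pvG b (i + 1) (j + 1) = some "S") := pvInd_congr (by simp)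
    have hB4 : pvInd (pvG b (i - 1) (j - -1) = some "S" ∧ ("O":String) = "O" ∧ pvG b (i + 1) (j + -1) = some "S")
        = pvInd (pvG b (i - 1) (j - -1) = some "S" ∧ pvG b (i + 1) (j + -1) = some "S") := pvInd_congr (by simp)
    rw [hA1, hA2, hA3, hA4, hC1, hC2, hC3, hC4, hB1, hB2, hB3, hB4]
    ring


-- ===== VERDICT (by name: the statement is the Claim_ definition above) =====
theorem fuzzy_move_spec : Claim_equal_fuzzy_move := by
  intro board hdom hpre
  unfold Spec_fuzzy_move fuzzy_move fuzzy_move_alt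
  rw [← pvCols_eq]
  dsimp only
  refine congrArg Prod.snd ?_
  apply PySem.List.foldl_congr_mem
  intro st i hi
  apply PySem.List.foldl_congr_mem
  intro st j hj
  rw [PySem.List.mem_pyRange_one] at hi hj
  by_cases hc : pvCell board i j = ""
  · rw [if_pos hc, if_pos hc]
    simp only [PySem.List.len_eq] at hi
    have hS := pvEval_set board i j "S" hpre hi hj hc (Or.inl rfl)
    have hO := pvEval_set board i j "O" hpre hi hj hc (Or.inr rfl)
    simp only [List.foldl, hS, hO]
  · rw [if_neg hc, if_neg hc]
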